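-- pv_equiv track=rewrite | github.com/madness007/algorithms-github | 2_LucasRow.py | rowLucas
-- ===== SOURCE A (Python) =====
-- def rowLucas(max):
--     __lucas = [2, 1]
--     __x = 1
--     __value = 0
--     while __lucas[__x] < max:
--         if __lucas[__x] % 2 == 1:
--             __value += __lucas[__x]
--         __x += 1
--         __lucas.append(__lucas[__x - 1] + __lucas[__x - 2])
--     return __value
-- ===== SOURCE B (Python) =====
-- def rowLucas(max):
--     # Generate only the odd Lucas numbers directly: they occur at indices
--     # n % 3 in {1, 2}, i.e. in consecutive pairs (p, q) = (L_{3k+1}, L_{3k+2})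
--     # starting at (1, 3), with the pair recurrence (p, q) -> (p + 2q, 2p + 3q).
--     # No parity test is needed and only a third of the terms are visited.
--     total = 0
--     p, q = 1, 3
--     while p < max:
--         total += p
--         if q < max:
--             total += q
--         p, q = p + 2 * q, 2 * p + 3 * q
--     return total
-- ===== Notes on version B (the rewrite author's own statement) =====
-- stated objective: alternative
-- what changed: Instead of generating every Lucas number in a growing list and parity-testing each, B iterates the pair recurrence (p,q)->(p+2q,2p+3q) over the odd Lucas numbers only (indices 1,2 mod 3), summing them with no parity test and a third of the iterations.
import Mathlib
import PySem

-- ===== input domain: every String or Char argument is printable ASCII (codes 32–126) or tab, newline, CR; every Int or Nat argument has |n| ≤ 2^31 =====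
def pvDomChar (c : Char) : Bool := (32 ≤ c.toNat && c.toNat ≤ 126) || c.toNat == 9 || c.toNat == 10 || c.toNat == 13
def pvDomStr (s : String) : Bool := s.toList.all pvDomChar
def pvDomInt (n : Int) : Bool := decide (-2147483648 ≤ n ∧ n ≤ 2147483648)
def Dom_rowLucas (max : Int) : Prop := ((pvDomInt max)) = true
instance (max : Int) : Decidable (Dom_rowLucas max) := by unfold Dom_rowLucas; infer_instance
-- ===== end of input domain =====

-- B generates only the odd Lucas numbers via the pair recurrence (p,q) -> (p+2q, 2p+3q),
-- so no history list and no parity test (alternative algorithm).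

-- ===== PORT A =====
-- A's loop state: the whole list __lucas, the index __x, the accumulator __value.
-- All Python list indexing in A is in range (x = len(lucas)-1 throughout), so List.getD is exact here.
-- The Nat fuel is only a totality guard: the tested entry starts at 1 and grows by
-- at least 1 each round, so the loop makes fewer than max.toNat + 1 iterations.
def rowLucasLoop (max : Int) : Nat → List Int → Nat → Int → Int
  | 0, _, _, value => value
  | fuel + 1, lucas, x, value =>
    if lucas.getD x 0 < max then
      -- while body: maybe add lucas[x]; x += 1; append lucas[x-1] + lucas[x-2] (= old lucas[x] + lucas[x-1])
      rowLucasLoop max fuel (lucas ++ [lucas.getD x 0 + lucas.getD (x - 1) 0]) (x + 1)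
        (if lucas.getD x 0 % 2 == 1 then value + lucas.getD x 0 else value)
    else value

def rowLucas (max : Int) : Int :=
  rowLucasLoop max (max.toNat + 1) [2, 1] 1 0

-- ===== PORT B =====
-- B's loop state: the current odd pair (p, q) and the running total.  Same fuel bound;
-- p grows by at least 2 each iteration, so the fuel never runs out.
def rowLucasAltLoop (max : Int) : Nat → Int → Int → Int → Int
  | 0, _, _, total => total
  | fuel + 1, p, q, total =>
    if p < max then
      rowLucasAltLoop max fuel (p + 2 * q) (2 * p + 3 * q)
        ((total + p) + (if q < max then q else 0))
    else total

def rowLucas_alt (max : Int) : Int :=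
  rowLucasAltLoop max (max.toNat + 1) 1 3 0

-- ===== PRECONDITION & SPEC =====
def Spec_rowLucas (max : Int) (out : Int) : Prop := out = rowLucas_alt max
instance (max : Int) (out : Int) : Decidable (Spec_rowLucas max out) := by unfold Spec_rowLucas; infer_instance

-- ===== CLAIM (what is proved, stated in full; the proofs are below) =====
def Claim_equal_rowLucas : Prop := ∀ (max : Int), Dom_rowLucas max → Spec_rowLucas max (rowLucas max)

-- ===== LEMMAS AND PROOFS =====

-- Proof-only intermediate: A's loop with its list collapsed to the last two entries (a, b).
def rowLucasScalar (max : Int) : Nat → Int → Int → Int → Int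
  | 0, _, _, value => value
  | fuel + 1, a, b, value =>
    if b < max then
      rowLucasScalar max fuel b (a + b) (if b % 2 == 1 then value + b else value)
    else value

-- A's loop reads the list only at its last two positions; those are the scalars (a, b).
lemma rowLucasLoop_eq_scalar (max : Int) (fuel : Nat) :
    ∀ (lucas : List Int) (x : Nat) (value : Int), x + 1 = lucas.length →
      rowLucasLoop max fuel lucas x value
        = rowLucasScalar max fuel (lucas.getD (x - 1) 0) (lucas.getD x 0) value := by
  induction fuel with
  | zero => intro lucas x value _; rfl
  | succ fuel ih =>
    intro lucas x value hx
    rw [rowLucasLoop, rowLucasScalar]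
    by_cases h : lucas.getD x 0 < max
    · rw [if_pos h, if_pos h]
      have hlt : x < lucas.length := by omega
      have e1 : (lucas ++ [lucas.getD x 0 + lucas.getD (x - 1) 0]).getD (x + 1) 0
          = lucas.getD x 0 + lucas.getD (x - 1) 0 := by
        simp [List.getD, ← hx]
      have e0 : (lucas ++ [lucas.getD x 0 + lucas.getD (x - 1) 0]).getD (x + 1 - 1) 0
          = lucas.getD x 0 := by
        simp [List.getD, List.getElem?_append_left hlt]
      rw [ih _ _ _ (by simp [← hx]), e0, e1, Int.add_comm]
    · rw [if_neg h, if_neg h]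

lemma scalar_stop (max : Int) (fuel : Nat) (a b v : Int) (h : ¬ b < max) :
    rowLucasScalar max fuel a b v = v := by
  cases fuel with
  | zero => rfl
  | succ f => rw [rowLucasScalar, if_neg h]

lemma alt_stop (max : Int) (fuel : Nat) (p q t : Int) (h : ¬ p < max) :
    rowLucasAltLoop max fuel p q t = t := by
  cases fuel with
  | zero => rfl
  | succ f => rw [rowLucasAltLoop, if_neg h]

-- Core bridge: three steps of the scalar loop (odd, odd, even term) = one step of the pair
-- loop, under the invariant (a even, b odd, both ≥ 1), for any two sufficient fuels.
lemma scalar_eq_alt (max : Int) :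
    ∀ (n : Nat) (a b t : Int), a % 2 = 0 → b % 2 = 1 → 1 ≤ a → 1 ≤ b →
      (max - b).toNat ≤ n →
      ∀ (f1 f2 : Nat), max ≤ b + f1 → max ≤ b + f2 →
        rowLucasScalar max f1 a b t = rowLucasAltLoop max f2 b (a + b) t := by
  intro n
  induction n with
  | zero =>
    intro a b t _ _ _ _ hn f1 f2 _ _
    have hb : ¬ b < max := by omega
    rw [scalar_stop max f1 a b t hb, alt_stop max f2 b (a + b) t hb]
  | succ n ih =>
    intro a b t hae hbo ha hb hn f1 f2 hf1 hf2
    by_cases h1 : b < max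
    · -- at least one iteration on each side
      have hbo' : (b % 2 == 1) = true := by simp [hbo]
      obtain ⟨f1', rfl⟩ : ∃ f, f1 = f + 1 := ⟨f1 - 1, by omega⟩
      obtain ⟨f2', rfl⟩ : ∃ f, f2 = f + 1 := ⟨f2 - 1, by omega⟩
      rw [rowLucasScalar, if_pos h1, hbo', if_pos rfl,
          rowLucasAltLoop, if_pos h1]
      by_cases h2 : a + b < max
      · -- scalar step 2 adds the odd term a + b
        obtain ⟨f1'', rfl⟩ : ∃ f, f1' = f + 1 := ⟨f1' - 1, by omega⟩
        have habo : ((a + b) % 2 == 1) = true := by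
          have : (a + b) % 2 = 1 := by omega
          simp [this]
        rw [rowLucasScalar, if_pos h2, habo, if_pos rfl, if_pos h2]
        by_cases h3 : b + (a + b) < max
        · -- scalar step 3: even term a + 2b, no add; recurse as the next pair
          obtain ⟨f1''', rfl⟩ : ∃ f, f1'' = f + 1 := ⟨f1'' - 1, by omega⟩
          have habe : ((b + (a + b)) % 2 == 1) = false := by
            have : (b + (a + b)) % 2 = 0 := by omega
            simp [this]
          rw [rowLucasScalar, if_pos h3, habe,
              show b + 2 * (a + b) = (a + b) + (b + (a + b)) by ring,
              show 2 * b + 3 * (a + b) = (b + (a + b)) + ((a + b) + (b + (a + b))) by ring]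
          exact ih (b + (a + b)) ((a + b) + (b + (a + b))) (t + b + (a + b))
            (by omega) (by omega) (by omega) (by omega) (by omega)
            f1''' f2' (by omega) (by omega)
        · -- scalar stops at the even term; the pair loop's next p = 2a+3b ≥ a+2b ≥ max
          rw [scalar_stop max f1'' (a + b) (b + (a + b)) (t + b + (a + b)) h3,
              alt_stop max f2' (b + 2 * (a + b)) (2 * b + 3 * (a + b)) _ (by omega)]
      · -- only b is below max; both sides stop after adding b
        rw [scalar_stop max f1' b (a + b) (t + b) h2,
            alt_stop max f2' (b + 2 * (a + b)) (2 * b + 3 * (a + b)) _ (by omega),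
            if_neg h2, add_zero]
    · rw [scalar_stop max f1 a b t h1, alt_stop max f2 b (a + b) t h1]

-- ===== VERDICT (by name: the statement is the Claim_ definition above) =====
theorem rowLucas_spec : Claim_equal_rowLucas := by
  intro max _
  show rowLucas max = rowLucas_alt max
  unfold rowLucas rowLucas_alt
  rw [rowLucasLoop_eq_scalar max _ [2, 1] 1 0 rfl]
  show rowLucasScalar max (max.toNat + 1) 2 1 0 = rowLucasAltLoop max (max.toNat + 1) 1 3 0
  have h3 : (3 : Int) = 2 + 1 := by norm_num
  rw [h3]
  exact scalar_eq_alt max (max - 1).toNat 2 1 0 (by norm_num) (by norm_num)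
    (by norm_num) (by norm_num) (by omega) _ _ (by omega) (by omega)
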